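-- pv_equiv track=rewrite | github.com/pendlm1/Python | PixelPlay.py | pages
-- ===== SOURCE A (Python) =====
-- def pages (nDigit):
--
--     """How many pages are in a book if n digits were used to print its pages?
--     Params: nDigit (int): #digits used by printer to number the pages of a book
--     Returns: (int) #pages in the book
--     """
--     a = 0
--     b = []
--     c = 0
--     assert type(nDigit)==int and nDigit>0
--     for i in range(1,nDigit+1):
--         b.append(len(str(i)))
--     for j in b:
--         a = a+j
--         c+=1
--         if a > nDigit:
--             break
--     if c<10:
--         return c
--     else:
--         return c-1
-- ===== SOURCE B (Python) =====
-- def pages(nDigit):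
--     """How many pages are in a book if n digits were used to print its pages?
--     Closed-form block computation: O(log n) instead of A's O(n) scan."""
--     assert type(nDigit) == int and nDigit > 0
--     rem = nDigit
--     p = 0
--     d = 1
--     block = 9
--     while rem >= d * block:
--         rem -= d * block
--         p += block
--         d += 1
--         block *= 10
--     return p + rem // d
-- ===== Notes on version B (the rewrite author's own statement) =====
-- stated objective: faster
-- what changed: A builds the digit-length of every page 1..nDigit and scans the running total page by page; B computes the answer arithmetically per digit-length block (9 one-digit pages, 90 two-digit pages, ...) and finishes with one integer division, O(log n) instead of O(n).
import Mathlib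
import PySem

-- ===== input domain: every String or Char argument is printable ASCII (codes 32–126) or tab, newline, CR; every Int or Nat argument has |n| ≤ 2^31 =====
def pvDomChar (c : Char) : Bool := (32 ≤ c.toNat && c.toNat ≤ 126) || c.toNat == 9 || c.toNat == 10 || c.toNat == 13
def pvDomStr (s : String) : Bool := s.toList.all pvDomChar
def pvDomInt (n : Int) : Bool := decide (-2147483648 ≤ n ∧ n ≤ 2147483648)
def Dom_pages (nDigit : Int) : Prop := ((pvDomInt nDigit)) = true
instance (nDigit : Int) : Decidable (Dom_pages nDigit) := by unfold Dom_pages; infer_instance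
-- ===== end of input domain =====

-- B replaces A's page-by-page digit-length scan by per-digit-length block arithmetic.

-- ===== PORT A =====
-- A's second loop: 'for j in b: a += j; c += 1; if a > nDigit: break'
def pagesLoop (b : List Int) (nDigit a c : Int) : Int :=
  match b with
  | [] => c
  | j :: rest =>
    let a' := a + j
    let c' := c + 1
    if a' > nDigit then c' else pagesLoop rest nDigit a' c'

def pages (nDigit : Int) : Int :=
  -- b = [len(str(i)) for i in range(1, nDigit+1)]
  let b := (PySem.List.pyRange 1 (nDigit + 1)).map (fun i => PySem.Str.len (PySem.Int.toStr i))
  let c := pagesLoop b nDigit 0 0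
  if c < 10 then c else c - 1

-- ===== PORT B =====
-- Source B's while loop; the Nat argument is fuel only (nDigit.toNat + 1 always suffices, proved below)
def pagesAltLoop : Nat → Int → Int → Int → Int → Int
  | 0, rem, p, d, _ => p + PySem.Int.floordiv rem d
  | f + 1, rem, p, d, block =>
    if d * block ≤ rem then
      pagesAltLoop f (rem - d * block) (p + block) (d + 1) (block * 10)
    else
      p + PySem.Int.floordiv rem d

def pages_alt (nDigit : Int) : Int :=
  pagesAltLoop (nDigit.toNat + 1) nDigit 0 1 9

-- ===== PRECONDITION & SPEC =====
-- A's 'assert nDigit > 0' raises AssertionError on nDigit ≤ 0; Pre_ excludes exactly those inputs.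
def Pre_pages (nDigit : Int) : Prop := 0 < nDigit
instance (nDigit : Int) : Decidable (Pre_pages nDigit) := by unfold Pre_pages; infer_instance
def pvWitness_pages : Int := 11

def Spec_pages (nDigit : Int) (out : Int) : Prop := out = pages_alt nDigit
instance (nDigit : Int) (out : Int) : Decidable (Spec_pages nDigit out) := by unfold Spec_pages; infer_instance

-- ===== CLAIM (what is proved, stated in full; the proofs are below) =====
def Claim_equal_pages : Prop := ∀ (nDigit : Int), Dom_pages nDigit → Pre_pages nDigit → Spec_pages nDigit (pages nDigit)

-- ===== LEMMAS AND PROOFS =====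

-- number of decimal digits of m (for m ≥ 1)
def dLen (m : Nat) : Nat := Nat.log 10 m + 1
-- total digits used to print pages 1..p
def dSum (p : Nat) : Nat := ((List.range p).map (fun k => dLen (k + 1))).sum

lemma dSum_zero : dSum 0 = 0 := rfl

lemma dSum_succ (p : Nat) : dSum (p + 1) = dSum p + dLen (p + 1) := by
  simp [dSum, List.range_succ]

lemma dLen_pos (m : Nat) : 1 ≤ dLen m := Nat.le_add_left 1 _

lemma dSum_le_dSum_add (p q : Nat) (h : p ≤ q) : dSum p + (q - p) ≤ dSum q := by
  induction q with
  | zero => simp_all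
  | succ q ih =>
    rcases Nat.lt_or_ge p (q + 1) with hlt | hge
    · have := ih (by omega)
      have := dLen_pos (q + 1)
      rw [dSum_succ]; omega
    · have : p = q + 1 := by omega
      subst this; omega

lemma dSum_mono (p q : Nat) (h : p ≤ q) : dSum p ≤ dSum q := by
  have := dSum_le_dSum_add p q h; omega

lemma self_le_dSum (p : Nat) : p ≤ dSum p := by
  have h := dSum_le_dSum_add 0 p (Nat.zero_le p)
  rw [dSum_zero] at h; omega

lemma dLen_eq (t m : Nat) (h1 : 10 ^ t ≤ m) (h2 : m < 10 ^ (t + 1)) : dLen m = t + 1 := by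
  simp [dLen, Nat.log_eq_of_pow_le_of_lt_pow h1 h2]

-- pages 10^t .. 10^t-1+k all have t+1 digits
lemma dSum_block (t : Nat) : ∀ k, k ≤ 9 * 10 ^ t →
    dSum (10 ^ t - 1 + k) = dSum (10 ^ t - 1) + k * (t + 1) := by
  intro k
  induction k with
  | zero => simp
  | succ k ih =>
    intro hk
    have hpow : 1 ≤ 10 ^ t := Nat.one_le_pow _ _ (by norm_num)
    have h1 : 10 ^ t - 1 + (k + 1) = (10 ^ t - 1 + k) + 1 := by omega
    have h2 : 10 ^ t ≤ 10 ^ t - 1 + k + 1 := by omega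
    have h3 : 10 ^ t - 1 + k + 1 < 10 ^ (t + 1) := by
      have : (10:Nat) ^ (t+1) = 10 * 10 ^ t := by ring
      omega
    rw [h1, dSum_succ, ih (by omega), dLen_eq t _ h2 h3]
    ring

lemma dSum_small (m : Nat) (h : m ≤ 9) : dSum m = m := by
  have := dSum_block 0 m (by omega)
  simpa [dSum_zero] using this

lemma dSum_ten : dSum 10 = 11 := by
  have h9 : dSum 9 = 9 := dSum_small 9 (by norm_num)
  have : dSum (9 + 1) = dSum 9 + dLen 10 := dSum_succ 9
  rw [dLen_eq 1 10 (by norm_num) (by norm_num)] at this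
  norm_num at this
  omega

lemma dSum_unique (N p q : Nat) (hp1 : dSum p ≤ N) (hp2 : N < dSum (p + 1))
    (hq1 : dSum q ≤ N) (hq2 : N < dSum (q + 1)) : p = q := by
  rcases Nat.lt_trichotomy p q with h | h | h
  · have := dSum_mono (p + 1) q (by omega); omega
  · exact h
  · have := dSum_mono (q + 1) p (by omega); omega

lemma exists_threshold (N : Nat) : ∃ p, dSum p ≤ N ∧ N < dSum (p + 1) := by
  classical
  have hex : ∃ p, N < dSum (p + 1) := ⟨N, by have := self_le_dSum (N + 1); omega⟩
  refine ⟨Nat.find hex, ?_, Nat.find_spec hex⟩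
  rcases hp0 : Nat.find hex with _ | q
  · rw [dSum_zero]; omega
  · have hmin := Nat.find_min hex (m := q) (by omega)
    omega

-- ---- A side ----

lemma loopA_all_le (xs : List Int) : ∀ (n a c : Int),
    (∀ k, k < xs.length → a + ((xs.take (k + 1)).sum) ≤ n) →
    pagesLoop xs n a c = c + xs.length := by
  induction xs with
  | nil => intro n a c _; simp [pagesLoop]
  | cons j rest ih =>
    intro n a c h
    have h0 := h 0 (by simp)
    simp at h0
    rw [pagesLoop]
    simp only [if_neg (by omega : ¬ a + j > n)]
    rw [ih n (a + j) (c + 1) ?_]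
    · simp; ring
    · intro k hk
      have := h (k + 1) (by simp; omega)
      simp at this ⊢
      omega

lemma loopA_break (ys : List Int) : ∀ (j : Int) (zs : List Int) (n a c : Int),
    (∀ k, k < ys.length → a + ((ys.take (k + 1)).sum) ≤ n) →
    n < a + ys.sum + j →
    pagesLoop (ys ++ j :: zs) n a c = c + ys.length + 1 := by
  induction ys with
  | nil =>
    intro j zs n a c _ hbr
    simp at hbr
    simp [pagesLoop, if_pos (by omega : a + j > n)]
  | cons y rest ih =>
    intro j zs n a c h hbr
    have h0 := h 0 (by simp)
    simp at h0
    rw [List.cons_append, pagesLoop]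
    simp only [if_neg (by omega : ¬ a + y > n)]
    rw [ih j zs n (a + y) (c + 1) ?_ ?_]
    · simp; ring
    · intro k hk
      have := h (k + 1) (by simp; omega)
      simp at this ⊢
      omega
    · simp at hbr ⊢
      omega

lemma pyRange_one_eq (N : Nat) :
    PySem.List.pyRange 1 ((N : Int) + 1) = (List.range N).map (fun (k : Nat) => (k : Int) + 1) := by
  induction N with
  | zero => rfl
  | succ N ih =>
    rw [show ((N + 1 : Nat) : Int) + 1 = ((N : Int) + 1) + 1 by push_cast; ring,
        PySem.List.pyRange_one_succ_right (by omega), ih, List.range_succ]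
    simp

lemma toDigitsCore_len : ∀ (f n : Nat), n < f →
    (Nat.toDigitsCore 10 f n []).length = Nat.log 10 n + 1 := by
  intro f
  induction f with
  | zero => omega
  | succ f ih =>
    intro n hn
    rw [Nat.toDigitsCore]
    by_cases h : n / 10 = 0
    · have hn10 : n < 10 := by omega
      simp [h, Nat.log_eq_zero_iff.2 (Or.inl hn10)]
    · rw [if_neg h, Nat.toDigitsCore_lens_eq]
      have hge : 10 ≤ n := by
        by_contra hc
        exact h (Nat.div_eq_of_lt (by omega))
      rw [ih (n / 10) (by omega)]
      have hlog := Nat.log_div_base 10 n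
      have hpos : 0 < Nat.log 10 n := Nat.log_pos (by norm_num) hge
      omega

lemma len_toStr (i : Int) (h : 1 ≤ i) :
    PySem.Str.len (PySem.Int.toStr i) = (dLen i.toNat : Nat) := by
  rw [PySem.Str.len_eq, PySem.Int.toList_toStr]
  unfold PySem.Int.toChars
  rw [if_neg (by omega), Nat.toDigits, toDigitsCore_len _ _ (by omega)]
  rfl

lemma map_len_eq (N : Nat) :
    (((List.range N).map (fun (k : Nat) => (k : Int) + 1)).map (fun i => PySem.Str.len (PySem.Int.toStr i)))
      = (List.range N).map (fun k => (dLen (k + 1) : Int)) := by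
  rw [List.map_map]
  apply List.map_congr_left
  intro k _
  simp only [Function.comp_apply]
  rw [len_toStr _ (by omega), show ((k : Int) + 1).toNat = k + 1 by omega]

lemma sum_map_dLen_cast (m : Nat) :
    (((List.range m).map (fun k => (dLen (k + 1) : Int))).sum) = (dSum m : Int) := by
  induction m with
  | zero => simp [dSum_zero]
  | succ m ih =>
    rw [List.range_succ, dSum_succ]
    simp [ih]

lemma pages_eq (n : Int) (hn : 1 ≤ n) (p : Nat)
    (h1 : dSum p ≤ n.toNat) (h2 : n.toNat < dSum (p + 1)) : pages n = (p : Int) := by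
  have hNn : (n.toNat : Int) = n := Int.toNat_of_nonneg (by omega)
  set N := n.toNat with hN
  simp only [pages]
  rw [show n + 1 = (N : Int) + 1 by omega, pyRange_one_eq, map_len_eq]
  have hpre : ∀ m : Nat, m ≤ N →
      ((((List.range N).map (fun k => (dLen (k + 1) : Int))).take m).sum) = (dSum m : Int) := by
    intro m hm
    rw [← List.map_take, List.take_range, Nat.min_eq_left hm, sum_map_dLen_cast]
  have hpN : p ≤ N := le_trans (self_le_dSum p) h1
  by_cases hcase : p = N
  · subst hcase
    rw [loopA_all_le _ n 0 0 ?_]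
    · have hN9 : N ≤ 9 := by
        by_contra hc
        have := dSum_le_dSum_add 10 N (by omega)
        have := dSum_ten
        omega
      simp only [List.length_map, List.length_range]
      rw [if_pos (by omega)]
      omega
    · intro k hk
      simp only [List.length_map, List.length_range] at hk
      rw [hpre (k + 1) (by omega)]
      have := dSum_mono (k + 1) N (by omega)
      omega
  · have hplt : p < N := by omega
    have hdecomp : (List.range N).map (fun k => (dLen (k + 1) : Int)) =
        ((List.range p).map (fun k => (dLen (k + 1) : Int))) ++ ((dLen (p + 1) : Int) ::
          ((List.range (N - p - 1)).map (fun x => (dLen ((p + 1 + x) + 1) : Int)))) := by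
      conv_lhs => rw [show N = (p + 1) + (N - p - 1) by omega, List.range_add, List.range_succ]
      simp [List.map_map, Function.comp]
    rw [hdecomp, loopA_break _ _ _ n 0 0 ?_ ?_]
    · simp only [List.length_map, List.length_range]
      rw [if_neg ?_]
      · omega
      · have hp9 : 9 ≤ p := by
          by_contra hc
          have hs1 : dSum p = p := dSum_small p (by omega)
          have hs2 : dSum (p + 1) = p + 1 := dSum_small (p + 1) (by omega)
          omega
        omega
    · intro k hk
      simp only [List.length_map, List.length_range] at hk
      have htk : (((List.range p).map (fun k => (dLen (k + 1) : Int))).take (k + 1)).sum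
          = (dSum (k + 1) : Int) := by
        rw [← List.map_take, List.take_range, Nat.min_eq_left (by omega), sum_map_dLen_cast]
      rw [htk]
      have := dSum_mono (k + 1) p (by omega)
      omega
    · rw [sum_map_dLen_cast]
      have := dSum_succ p
      omega

-- ---- B side ----

lemma loopB_run (n : Int) (hn : 1 ≤ n) (p : Nat)
    (h1 : dSum p ≤ n.toNat) (h2 : n.toNat < dSum (p + 1)) :
    ∀ (f t : Nat), dSum (10 ^ t - 1) ≤ n.toNat →
      n - (dSum (10 ^ t - 1) : Int) < 9 * f →
      pagesAltLoop f (n - (dSum (10 ^ t - 1) : Int)) ((10 ^ t - 1 : Nat) : Int)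
        ((t + 1 : Nat) : Int) ((9 * 10 ^ t : Nat) : Int) = (p : Int) := by
  have hNn : (n.toNat : Int) = n := Int.toNat_of_nonneg (by omega)
  intro f
  induction f with
  | zero =>
    intro t hlow hfuel
    exfalso
    omega
  | succ f ih =>
    intro t hlow hfuel
    have hpow : 1 ≤ 10 ^ t := Nat.one_le_pow _ _ (by norm_num)
    have hKc : ((t + 1 : Nat) : Int) * ((9 * 10 ^ t : Nat) : Int)
        = ((9 * 10 ^ t * (t + 1) : Nat) : Int) := by push_cast; ring
    have hblock : dSum (10 ^ (t + 1) - 1) = dSum (10 ^ t - 1) + 9 * 10 ^ t * (t + 1) := by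
      have hb := dSum_block t (9 * 10 ^ t) le_rfl
      have hid : 10 ^ t - 1 + 9 * 10 ^ t = 10 ^ (t + 1) - 1 := by
        have : (10:Nat) ^ (t+1) = 10 * 10 ^ t := by ring
        omega
      rw [hid] at hb
      omega
    have hK9 : 9 ≤ 9 * 10 ^ t * (t + 1) := by nlinarith
    rw [pagesAltLoop]
    by_cases hc : ((t + 1 : Nat) : Int) * ((9 * 10 ^ t : Nat) : Int) ≤ n - (dSum (10 ^ t - 1) : Int)
    · rw [if_pos hc]
      rw [hKc] at hc
      have hstep := ih (t + 1) (by omega) (by omega)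
      have e1 : n - (dSum (10 ^ t - 1) : Int) - ((t + 1 : Nat) : Int) * ((9 * 10 ^ t : Nat) : Int)
          = n - (dSum (10 ^ (t + 1) - 1) : Int) := by rw [hKc]; push_cast [hblock]; ring
      have e2 : ((10 ^ t - 1 : Nat) : Int) + ((9 * 10 ^ t : Nat) : Int)
          = ((10 ^ (t + 1) - 1 : Nat) : Int) := by
        have : (10:Nat) ^ (t+1) = 10 * 10 ^ t := by ring
        omega
      have e3 : ((t + 1 : Nat) : Int) + 1 = ((t + 1 + 1 : Nat) : Int) := by push_cast; ring
      have e4 : ((9 * 10 ^ t : Nat) : Int) * 10 = ((9 * 10 ^ (t + 1) : Nat) : Int) := by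
        push_cast [pow_succ]; ring
      rw [e1, e2, e3, e4]
      exact hstep
    · rw [if_neg hc]
      rw [hKc] at hc
      rw [not_le] at hc
      set r : Nat := n.toNat - dSum (10 ^ t - 1) with hr
      have hrem : n - (dSum (10 ^ t - 1) : Int) = (r : Int) := by omega
      have hrlt : r < 9 * 10 ^ t * (t + 1) := by omega
      rw [hrem, PySem.Int.floordiv_natCast]
      set k : Nat := r / (t + 1) with hk
      have hkB : k + 1 ≤ 9 * 10 ^ t := by
        have : k < 9 * 10 ^ t := by
          rw [hk]
          exact (Nat.div_lt_iff_lt_mul (by omega)).2 (by rw [Nat.mul_comm] at hrlt ⊢; omega)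
        omega
      have hk_le : k * (t + 1) ≤ r := Nat.div_mul_le_self r (t + 1)
      have hr_lt : r < (k + 1) * (t + 1) := by
        have hdm := Nat.div_add_mod r (t + 1)
        have hmod := Nat.mod_lt r (show 0 < t + 1 by omega)
        nlinarith
      have hb1 := dSum_block t k (by omega)
      have hb2 := dSum_block t (k + 1) hkB
      have hq1 : dSum (10 ^ t - 1 + k) ≤ n.toNat := by omega
      have hq2 : n.toNat < dSum (10 ^ t - 1 + k + 1) := by
        have : 10 ^ t - 1 + (k + 1) = 10 ^ t - 1 + k + 1 := by omega
        rw [this] at hb2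
        omega
      have hpq : p = 10 ^ t - 1 + k := dSum_unique n.toNat p (10 ^ t - 1 + k) h1 h2 hq1 hq2
      omega

lemma pages_alt_eq (n : Int) (hn : 1 ≤ n) (p : Nat)
    (h1 : dSum p ≤ n.toNat) (h2 : n.toNat < dSum (p + 1)) : pages_alt n = (p : Int) := by
  have hNn : (n.toNat : Int) = n := Int.toNat_of_nonneg (by omega)
  have h := loopB_run n hn p h1 h2 (n.toNat + 1) 0 (by norm_num [dSum_zero])
    (by norm_num [dSum_zero]; omega)
  unfold pages_alt
  norm_num [dSum_zero] at h
  simpa using h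

-- ===== VERDICT (by name: the statement is the Claim_ definition above) =====
theorem pages_spec : Claim_equal_pages := by
  intro n _ hpre
  unfold Spec_pages
  obtain ⟨p, h1, h2⟩ := exists_threshold n.toNat
  rw [pages_eq n hpre p h1 h2, pages_alt_eq n hpre p h1 h2]
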